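-- pv_equiv track=rewrite | github.com/Beunador10/Cryptage | Programme_de_cryptage.py | detail_cle
-- ===== SOURCE A (Python) =====
-- def detail_cle(texte_clair, cle):
--     cle_detail = ''
--     i = 0
--     for char in texte_clair:
--         if char.isalpha():
--             cle_detail += cle[i % len(cle)]
--             i += 1
--         else:
--             cle_detail += ''
--
--     return cle_detail
-- ===== SOURCE B (Python) =====
-- def detail_cle(texte_clair, cle):
--     n = sum(1 for c in texte_clair if c.isalpha())
--     return ''.join(cle[j % len(cle)] for j in range(n))
-- ===== Notes on version B (the rewrite author's own statement) =====
-- stated objective: simpler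
-- what changed: Replaces A's single interleaved walk that advances a key index only on alphabetic characters with two independent passes: count the alphabetic characters, then generate the key stream directly over range(n) with modular indexing.
import Mathlib
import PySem

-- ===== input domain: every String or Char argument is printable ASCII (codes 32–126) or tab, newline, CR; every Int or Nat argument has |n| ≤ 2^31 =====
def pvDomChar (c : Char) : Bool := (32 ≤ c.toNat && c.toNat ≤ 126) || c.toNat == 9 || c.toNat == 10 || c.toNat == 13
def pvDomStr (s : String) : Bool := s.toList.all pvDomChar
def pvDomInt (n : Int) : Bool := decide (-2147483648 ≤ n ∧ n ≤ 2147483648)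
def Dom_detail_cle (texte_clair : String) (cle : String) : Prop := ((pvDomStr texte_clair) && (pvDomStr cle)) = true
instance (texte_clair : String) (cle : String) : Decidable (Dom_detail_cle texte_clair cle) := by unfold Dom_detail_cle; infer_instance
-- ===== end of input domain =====

-- B replaces A's single interleaved walk (key index advanced only on alpha chars) by two
-- independent passes: count the alphabetic characters, then generate the key stream over
-- range(n) with modular indexing (objective: simpler).

-- ===== PORT A =====
-- A's loop: fold over the characters with state (accumulated key stream, key index i);
-- cle[i % len(cle)] is pyGetD (always in range under Pre_, where len(cle) > 0 when reached).
def detail_cle (texte_clair : String) (cle : String) : String :=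
  let r := texte_clair.toList.foldl
    (fun (st : List Char × Nat) char =>
      if PySem.Chars.isalpha char then
        (st.1 ++ [PySem.List.pyGetD cle.toList ((st.2 % cle.toList.length : Nat) : Int) ' '], st.2 + 1)
      else st)
    ([], 0)
  String.mk r.1

-- ===== PORT B =====
-- B: n = sum(1 for c in texte_clair if c.isalpha()); ''.join(cle[j % len(cle)] for j in range(n))
def detail_cle_alt (texte_clair : String) (cle : String) : String :=
  let n := texte_clair.toList.foldl (fun acc c => if PySem.Chars.isalpha c then acc + 1 else acc) 0
  String.mk ((List.range n).map
    (fun j => PySem.List.pyGetD cle.toList ((j % cle.toList.length : Nat) : Int) ' '))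

-- ===== PRECONDITION & SPEC =====
-- Pre_ excludes only the inputs where A raises ZeroDivisionError: an empty key together
-- with at least one alphabetic character in the text (B raises identically there).
def Pre_detail_cle (texte_clair : String) (cle : String) : Prop :=
  cle ≠ "" ∨ (∀ c ∈ texte_clair.toList, PySem.Chars.isalpha c = false)
instance (texte_clair : String) (cle : String) : Decidable (Pre_detail_cle texte_clair cle) := by
  unfold Pre_detail_cle; infer_instance
def pvWitness_detail_cle : String × String := ("attack at dawn!", "key")

def Spec_detail_cle (texte_clair : String) (cle : String) (out : String) : Prop :=
  out = detail_cle_alt texte_clair cle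
instance (texte_clair : String) (cle : String) (out : String) : Decidable (Spec_detail_cle texte_clair cle out) := by
  unfold Spec_detail_cle; infer_instance

-- ===== CLAIM =====
def Claim_equal_detail_cle : Prop :=
  ∀ (texte_clair : String) (cle : String), Dom_detail_cle texte_clair cle →
    Pre_detail_cle texte_clair cle →
    Spec_detail_cle texte_clair cle (detail_cle texte_clair cle)

-- ===== LEMMAS AND PROOFS =====
-- count of alpha chars, B's first pass
theorem pv_count_eq (l : List Char) (a : Nat) :
    l.foldl (fun acc c => if PySem.Chars.isalpha c then acc + 1 else acc) a
      = a + l.countP (fun c => PySem.Chars.isalpha c) := by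
  induction l generalizing a with
  | nil => simp
  | cons c l ih => by_cases h : PySem.Chars.isalpha c <;> simp [h, ih, List.countP_cons] <;> omega

-- A's loop invariant: the fold produces acc ++ the key stream for the alpha-count of l,
-- with indices shifted by the incoming index i.
theorem pv_foldA (cle : List Char) (l : List Char) (acc : List Char) (i : Nat) :
    l.foldl
      (fun (st : List Char × Nat) char =>
        if PySem.Chars.isalpha char then
          (st.1 ++ [PySem.List.pyGetD cle ((st.2 % cle.length : Nat) : Int) ' '], st.2 + 1)
        else st)
      (acc, i)
      = (acc ++ (List.range (l.countP (fun c => PySem.Chars.isalpha c))).map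
            (fun j => PySem.List.pyGetD cle (((i + j) % cle.length : Nat) : Int) ' '),
         i + l.countP (fun c => PySem.Chars.isalpha c)) := by
  induction l generalizing acc i with
  | nil => simp
  | cons c l ih =>
    rw [List.foldl_cons]
    by_cases h : PySem.Chars.isalpha c
    · rw [if_pos h, ih]
      simp only [List.countP_cons, h, if_pos]
      refine Prod.ext ?_ (by omega)
      simp only [List.range_succ_eq_map, List.map_cons, List.map_map,
        List.append_assoc, List.singleton_append, Nat.cast_add, Nat.cast_one]
      congr 1
      norm_num
      intro a _
      have h2 : ((i : Int) + 1 + (a : Int)) = (i : Int) + ((a : Int) + 1) := by ring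
      rw [h2]
    · rw [if_neg h, ih]
      simp [h]

-- ===== VERDICT =====
theorem detail_cle_spec : Claim_equal_detail_cle := by
  intro t cle _ _
  unfold Spec_detail_cle detail_cle detail_cle_alt
  simp only [pv_foldA, pv_count_eq, Nat.zero_add, List.nil_append]
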